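-- pv_equiv track=rewrite | github.com/tusharrao198/CP_practice | competitive/contests/5th_MAY_21/2.py | check
-- ===== SOURCE A (Python) =====
-- def check(s):
--     c = 1
--     v = str(s)
--     same = v[0]
--     for g in range(1, len(v)):
--         if v[g] == same:
--             c += 1
--         else:
--             break
--     if c == len(v):
--         return True
--     else:
--         return False
-- ===== SOURCE B (Python) =====
-- def check(s):
--     v = str(s)
--     return v == v[0] * len(v)
-- ===== Notes on version B (the rewrite author's own statement) =====
-- stated objective: simpler
-- what changed: Replaces the counting loop with break and the count-vs-length comparison by a single loop-free expression: build the string of the first character repeated len(v) times and compare it to v.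
import Mathlib
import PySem

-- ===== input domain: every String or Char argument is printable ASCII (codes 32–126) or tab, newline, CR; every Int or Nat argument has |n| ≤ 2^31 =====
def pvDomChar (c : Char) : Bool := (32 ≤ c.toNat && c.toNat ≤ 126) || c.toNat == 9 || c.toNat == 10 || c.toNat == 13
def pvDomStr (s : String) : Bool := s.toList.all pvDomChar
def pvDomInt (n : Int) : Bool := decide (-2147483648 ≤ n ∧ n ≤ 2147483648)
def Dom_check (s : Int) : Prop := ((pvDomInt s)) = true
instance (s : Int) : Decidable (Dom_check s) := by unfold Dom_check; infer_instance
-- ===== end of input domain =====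

-- B replaces A's counting loop with a single loop-free comparison of str(s) against
-- its first character repeated len(str(s)) times (objective: simpler).


-- ===== PORT A =====
-- the for-loop over range(1, len(v)) with break: count the chars after the first
-- that equal `same`, stopping at the first mismatch (c starts at 1 in `check`)
def checkLoop (same : Char) : List Char → Int
  | [] => 0
  | g :: gs => if g == same then 1 + checkLoop same gs else 0

def check (s : Int) : Bool :=
  let v := PySem.Int.toChars s
  match v with
  | [] => false   -- v[0] would raise IndexError; str(s) is never empty, unreachable
  | same :: rest =>
    let c : Int := 1 + checkLoop same rest
    if c = (v.length : Int) then true else false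

-- ===== PORT B =====
def check_alt (s : Int) : Bool :=
  let v := PySem.Int.toChars s
  match v with
  | [] => false   -- v[0] would raise IndexError; str(s) is never empty, unreachable
  | h :: _ => v = List.replicate v.length h

-- ===== PRECONDITION & SPEC =====
def Spec_check (s : Int) (out : Bool) : Prop := out = check_alt s
instance (s : Int) (out : Bool) : Decidable (Spec_check s out) := by unfold Spec_check; infer_instance

-- ===== CLAIM (what is proved, stated in full; the proofs are below) =====
def Claim_equal_check : Prop := ∀ (s : Int), Dom_check s → Spec_check s (check s)

-- ===== LEMMAS AND PROOFS =====

theorem checkLoop_eq_length_iff (same : Char) (t : List Char) :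
    checkLoop same t = (t.length : Int) ↔ t = List.replicate t.length same := by
  induction t with
  | nil => simp [checkLoop]
  | cons g gs ih =>
    simp only [checkLoop, List.length_cons, List.replicate_succ]
    by_cases hg : g = same
    · subst hg
      simp only [beq_self_eq_true, if_true]
      constructor
      · intro h
        have : checkLoop g gs = (gs.length : Int) := by push_cast at h ⊢; omega
        simpa using ih.mp this
      · intro h
        have hgs : gs = List.replicate gs.length g := by
          have := congrArg List.tail h; simpa using this
        have := ih.mpr hgs
        push_cast
        omega
    · simp only [beq_iff_eq, hg, if_false]
      constructor
      · intro h; exfalso; omega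
      · intro h
        exfalso
        have : g = same := by
          have := congrArg (fun l => l.headD same) h; simpa using this
        exact hg this

-- ===== VERDICT (by name: the statement is the Claim_ definition above) =====
theorem check_spec : Claim_equal_check := by
  intro s _
  unfold Spec_check check check_alt
  cases h : PySem.Int.toChars s with
  | nil => rfl
  | cons same rest =>
    simp only [List.length_cons, List.replicate_succ]
    by_cases hc : (1 + checkLoop same rest) = (((same :: rest).length : Nat) : Int)
    · have hr : checkLoop same rest = (rest.length : Int) := by
        simp only [List.length_cons] at hc; push_cast at hc; omega
      have := (checkLoop_eq_length_iff same rest).mp hr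
      simp only [List.length_cons] at hc
      simp [hc, ← this]
    · have hr : checkLoop same rest ≠ (rest.length : Int) := by
        simp only [List.length_cons] at hc; push_cast at hc ⊢; omega
      have hne := (not_iff_not.mpr (checkLoop_eq_length_iff same rest)).mp hr
      simp only [List.length_cons] at hc
      simp [hne]
      push_cast at hc ⊢
      omega
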